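-- pv_equiv track=rewrite | github.com/Promiskuous/Drawrawr | system/util.py | parseCommentMap
-- ===== SOURCE A (Python) =====
-- def parseCommentMap(cMap):
--   '''
--   Returns a string that can be used in mongodb to find a comment reply
--
--   Input:  "1,2,3,4,5"
--   Output: "r.1.r.2.r.3.r.4.r.5.r"
--   '''
--   if cMap == "": return "r"
--   validMap = "r."
--   currentObject = ""
--   for c in cMap:
--     if c == ",":
--       int(currentObject)
--       validMap += currentObject + ".r."
--       currentObject = ""
--     else: currentObject += c
--   int(currentObject)
--   validMap += currentObject + ".r"
--   return validMap
-- ===== SOURCE B (Python) =====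
-- def parseCommentMap(cMap):
--   if cMap == "": return "r"
--   parts = cMap.split(",")
--   for p in parts:
--     int(p)  # same validation as A: ValueError on non-integer segments
--   return "r." + ".r.".join(parts) + ".r"
-- ===== Notes on version B (the rewrite author's own statement) =====
-- stated objective: idiomatic
-- what changed: Replaces A's character-by-character accumulation loop with a split-validate-join over whole comma-separated segments, keeping the raw substrings verbatim.
import Mathlib
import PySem

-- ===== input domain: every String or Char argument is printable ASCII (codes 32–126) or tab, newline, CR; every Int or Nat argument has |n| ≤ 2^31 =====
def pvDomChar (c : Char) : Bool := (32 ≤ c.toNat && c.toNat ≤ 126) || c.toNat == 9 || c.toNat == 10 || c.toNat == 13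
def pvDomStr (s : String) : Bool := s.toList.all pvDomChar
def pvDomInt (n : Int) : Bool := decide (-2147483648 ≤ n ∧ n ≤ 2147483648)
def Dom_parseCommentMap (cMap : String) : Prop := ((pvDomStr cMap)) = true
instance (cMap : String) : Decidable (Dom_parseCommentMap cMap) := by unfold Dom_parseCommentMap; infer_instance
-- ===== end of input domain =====

-- B replaces A's character-by-character accumulation loop by split-validate-join over whole
-- segments (more idiomatic, same cost); equivalence is proved on inputs where A returns (Pre_).

-- ===== PORT A =====
-- one loop iteration of A: state = (validMap, currentObject); none = ValueError was raised
def pcmStep (st : Option (List Char × List Char)) (c : Char) : Option (List Char × List Char) :=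
  match st with
  | none => none
  | some (vm, cur) =>
    if c = ',' then
      match PySem.Int.ofChars? cur with         -- int(currentObject)
      | none => none                            -- ValueError
      | some _ => some (vm ++ cur ++ ['.', 'r', '.'], [])
    else some (vm, cur ++ [c])

def parseCommentMap (cMap : String) : String :=
  if cMap = "" then "r" else
  match cMap.toList.foldl pcmStep (some (['r', '.'], [])) with
  | none => ""                                  -- Python raised ValueError here (outside Pre_)
  | some (vm, cur) =>
    match PySem.Int.ofChars? cur with           -- final int(currentObject)
    | none => ""                                -- Python raised ValueError here (outside Pre_)
    | some _ => String.ofList (vm ++ cur ++ ['.', 'r'])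

-- ===== PORT B =====
def parseCommentMap_alt (cMap : String) : String :=
  if cMap = "" then "r" else
  if (cMap.toList.splitOn ',').all (fun p => (PySem.Int.ofChars? p).isSome) then   -- for p in parts: int(p)
    String.ofList (['r', '.'] ++ List.intercalate ['.', 'r', '.'] (cMap.toList.splitOn ',') ++ ['.', 'r'])
  else ""                                       -- Python raised ValueError here (outside Pre_)

-- ===== PRECONDITION & SPEC =====
-- Pre_ excludes exactly the inputs on which A raises ValueError: a nonempty cMap with some
-- comma-separated segment that is not a valid Python int literal.
def Pre_parseCommentMap (cMap : String) : Prop :=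
  cMap = "" ∨ ∀ p ∈ cMap.toList.splitOn ',', (PySem.Int.ofChars? p).isSome = true
instance (cMap : String) : Decidable (Pre_parseCommentMap cMap) := by
  unfold Pre_parseCommentMap; infer_instance
def pvWitness_parseCommentMap : String := "1,2"

def Spec_parseCommentMap (cMap : String) (out : String) : Prop := out = parseCommentMap_alt cMap
instance (cMap : String) (out : String) : Decidable (Spec_parseCommentMap cMap out) := by unfold Spec_parseCommentMap; infer_instance

-- ===== CLAIM (what is proved, stated in full; the proofs are below) =====
def Claim_equal_parseCommentMap : Prop := ∀ (cMap : String), Dom_parseCommentMap cMap → Pre_parseCommentMap cMap → Spec_parseCommentMap cMap (parseCommentMap cMap)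

-- ===== LEMMAS AND PROOFS =====

lemma foldl_pcmStep_none (l : List Char) : l.foldl pcmStep none = none := by
  induction l with
  | nil => rfl
  | cons c l ih => simpa [pcmStep] using ih

lemma modifyHead_id' (xs : List (List Char)) : xs.modifyHead (fun x => x) = xs := by
  cases xs <;> rfl

lemma intercalate_cons_of_ne_nil (s x : List Char) (l : List (List Char)) (h : l ≠ []) :
    List.intercalate s (x :: l) = x ++ s ++ List.intercalate s l := by
  cases l with
  | nil => exact absurd rfl h
  | cons y ys => simp [List.intercalate]

lemma splitOn_cons (c : Char) (l : List Char) :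
    List.splitOn ',' (c :: l) =
      if c = ',' then [] :: List.splitOn ',' l
      else (List.splitOn ',' l).modifyHead (List.cons c) := by
  simp [List.splitOn, List.splitOnP_cons]

lemma splitOn_ne_nil (l : List Char) : List.splitOn ',' l ≠ [] :=
  List.splitOnP_ne_nil _ l

-- the loop of A, continued from state (vm, cur), agrees with B's split-validate-join of the
-- remaining characters with cur prepended to the first segment
lemma pcm_fold (l : List Char) : ∀ vm cur : List Char,
    (match l.foldl pcmStep (some (vm, cur)) with
     | none => ""
     | some (vm', cur') =>
       match PySem.Int.ofChars? cur' with
       | none => ""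
       | some _ => String.ofList (vm' ++ cur' ++ ['.', 'r'])) =
    (if ((List.splitOn ',' l).modifyHead (cur ++ ·)).all
          (fun p => (PySem.Int.ofChars? p).isSome) then
       String.ofList (vm ++ List.intercalate ['.', 'r', '.']
                    ((List.splitOn ',' l).modifyHead (cur ++ ·)) ++ ['.', 'r'])
     else "") := by
  induction l with
  | nil =>
    intro vm cur
    simp only [List.foldl_nil, List.splitOn, List.splitOnP_nil, List.modifyHead,
      List.all_cons, List.all_nil, List.append_nil, Bool.and_true]
    cases PySem.Int.ofChars? cur <;>
      simp [List.intercalate]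
  | cons c l ih =>
    intro vm cur
    rw [List.foldl_cons, splitOn_cons]
    by_cases hc : c = ','
    · subst hc
      rw [if_pos rfl]
      have hstep : pcmStep (some (vm, cur)) ',' =
          (match PySem.Int.ofChars? cur with
           | none => none
           | some _ => some (vm ++ cur ++ ['.', 'r', '.'], ([] : List Char))) := by
        simp [pcmStep]
      rw [hstep]
      cases h : PySem.Int.ofChars? cur with
      | none =>
        rw [foldl_pcmStep_none]
        simp [h]
      | some v =>
        rw [ih]
        have hmod : (List.splitOn ',' l).modifyHead (fun x => [] ++ x) = List.splitOn ',' l := by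
          simpa using modifyHead_id' (List.splitOn ',' l)
        rw [hmod]
        simp only [List.modifyHead_cons, List.append_nil, List.all_cons, h, Option.isSome_some,
          Bool.true_and]
        by_cases hall : (List.splitOn ',' l).all (fun p => (PySem.Int.ofChars? p).isSome) = true
        · rw [if_pos hall, if_pos hall,
            intercalate_cons_of_ne_nil _ _ _ (splitOn_ne_nil l)]
          simp [List.append_assoc]
        · rw [if_neg hall, if_neg hall]
    · simp only [pcmStep, if_neg hc]
      rw [ih]
      have hmod : ((List.splitOn ',' l).modifyHead (List.cons c)).modifyHead (cur ++ ·)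
          = (List.splitOn ',' l).modifyHead ((cur ++ [c]) ++ ·) := by
        rw [List.modifyHead_modifyHead]
        congr 1
        funext x
        simp
      rw [hmod]

theorem pcm_total_eq (cMap : String) : parseCommentMap cMap = parseCommentMap_alt cMap := by
  unfold parseCommentMap parseCommentMap_alt
  by_cases h : cMap = ""
  · simp [h]
  · rw [if_neg h, if_neg h]
    have h2 := pcm_fold cMap.toList ['r', '.'] []
    simp only [List.nil_append] at h2
    rw [modifyHead_id' (List.splitOn ',' cMap.toList)] at h2
    exact h2

-- ===== VERDICT (by name: the statement is the Claim_ definition above) =====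
theorem parseCommentMap_spec : Claim_equal_parseCommentMap := by
  intro cMap _ _
  unfold Spec_parseCommentMap
  exact pcm_total_eq cMap
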